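-- pv_equiv track=rewrite | github.com/RopePy/nip | nip/nip.py | add_dep_to_nipfile_context
-- ===== SOURCE A (Python) =====
-- def add_dep_to_nipfile_context(dep, nipfile, dev=False):
--     dependency_key = 'dev_dependencies' if dev else 'dependencies'
--     try:
--         nipfile[dependency_key].update({**dep})
--     except KeyError:
--         nipfile[dependency_key] = dict()
--         return add_dep_to_nipfile_context(dep, nipfile, dev)
--     else:
--         return nipfile
-- ===== SOURCE B (Python) =====
-- def add_dep_to_nipfile_context(dep, nipfile, dev=False):
--     # Builds and returns a fresh dict (no in-place mutation of nipfile, unlike A);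
--     # equivalence is about the return value.
--     dependency_key = 'dev_dependencies' if dev else 'dependencies'
--     result = {k: ({**v, **dep} if k == dependency_key else v)
--               for k, v in nipfile.items()}
--     if dependency_key not in result:
--         result[dependency_key] = {**dep}
--     return result
-- ===== Notes on version B (the rewrite author's own statement) =====
-- stated objective: alternative
-- what changed: B builds and returns a fresh dict in one functional pass (a comprehension that merges dep at the chosen key via dict-unpacking, appending the key if absent), instead of A's in-place mutation guarded by try/except KeyError with a self-recursive retry.
import Mathlib
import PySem

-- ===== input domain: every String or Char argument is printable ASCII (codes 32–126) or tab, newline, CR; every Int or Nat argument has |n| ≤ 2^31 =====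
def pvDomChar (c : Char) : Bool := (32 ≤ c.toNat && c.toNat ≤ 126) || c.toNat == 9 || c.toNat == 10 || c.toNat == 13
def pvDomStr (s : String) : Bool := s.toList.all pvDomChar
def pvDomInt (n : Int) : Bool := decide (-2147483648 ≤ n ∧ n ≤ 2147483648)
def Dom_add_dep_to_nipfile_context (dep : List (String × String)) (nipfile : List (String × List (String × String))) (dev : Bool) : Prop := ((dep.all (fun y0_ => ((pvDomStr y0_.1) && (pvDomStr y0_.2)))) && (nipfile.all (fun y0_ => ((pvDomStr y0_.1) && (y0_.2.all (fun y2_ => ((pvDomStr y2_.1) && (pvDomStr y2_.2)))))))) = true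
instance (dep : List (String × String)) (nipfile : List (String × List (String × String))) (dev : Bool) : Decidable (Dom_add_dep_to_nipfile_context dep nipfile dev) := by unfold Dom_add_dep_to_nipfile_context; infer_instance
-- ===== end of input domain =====

-- B rebuilds the result dict in one functional pass instead of A's in-place try/except mutation
-- with a recursive retry (alternative decomposition). A mutates nipfile in place and returns it,
-- B returns a fresh dict: the equivalence proved here is about the RETURN value only.

-- Shared dict helpers (Python dict semantics on assoc lists: first-match lookup,
-- overwrite-in-place keeping position, new keys appended).
def pvGetA {α : Type} (d : List (String × α)) (k : String) : Option α :=
  match d with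
  | [] => none
  | (k', v') :: rest => if k' == k then some v' else pvGetA rest k

def pvSetA {α : Type} (d : List (String × α)) (k : String) (v : α) : List (String × α) :=
  match d with
  | [] => [(k, v)]
  | (k', v') :: rest => if k' == k then (k, v) :: rest else (k', v') :: pvSetA rest k v

-- d.update({**dep}) / {**d, **dep}: insert dep's pairs in order
def pvUpdateA (d : List (String × String)) (dep : List (String × String)) : List (String × String) :=
  dep.foldl (fun acc p => pvSetA acc p.1 p.2) d

-- needed by port A's decreasing_by
theorem pvGetA_setA_self {α : Type} (d : List (String × α)) (k : String) (v : α) :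
    pvGetA (pvSetA d k v) k = some v := by
  induction d with
  | nil => simp [pvSetA, pvGetA]
  | cons p rest ih =>
    obtain ⟨k', v'⟩ := p
    by_cases h : k' == k
    · simp [pvSetA, pvGetA, h]
    · simp only [pvSetA, h]
      simp [pvGetA, h, ih]

-- ===== PORT A =====
-- dependency_key = 'dev_dependencies' if dev else 'dependencies' is written inline below
def add_dep_to_nipfile_context (dep : List (String × String)) (nipfile : List (String × List (String × String))) (dev : Bool) : List (String × List (String × String)) :=
  match _h : pvGetA nipfile (if dev then "dev_dependencies" else "dependencies") with
  | some d =>   -- try branch succeeds: in-place update of the nested dict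
      pvSetA nipfile (if dev then "dev_dependencies" else "dependencies") (pvUpdateA d dep)
  | none =>     -- KeyError: set nipfile[dependency_key] = {} and recurse
      add_dep_to_nipfile_context dep (pvSetA nipfile (if dev then "dev_dependencies" else "dependencies") []) dev
termination_by (if (pvGetA nipfile (if dev then "dev_dependencies" else "dependencies")).isSome then 0 else 1 : Nat)
decreasing_by
  cases dev <;> simp_all [pvGetA_setA_self]

-- ===== PORT B =====
def add_dep_to_nipfile_context_alt (dep : List (String × String)) (nipfile : List (String × List (String × String))) (dev : Bool) : List (String × List (String × String)) :=
  let dependency_key := if dev then "dev_dependencies" else "dependencies"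
  -- result = {k: ({**v, **dep} if k == dependency_key else v) for k, v in nipfile.items()}
  let result := nipfile.map (fun p => if p.1 == dependency_key then (p.1, pvUpdateA p.2 dep) else p)
  -- if dependency_key not in result: result[dependency_key] = {**dep}
  if (pvGetA result dependency_key).isSome then result
  else result ++ [(dependency_key, pvUpdateA [] dep)]

-- ===== PRECONDITION & SPEC =====
-- Pre_ requires nipfile's top-level keys to be distinct. A Python dict always satisfies this;
-- it only excludes association lists with duplicate keys, which do not represent any dict input.
def Pre_add_dep_to_nipfile_context (dep : List (String × String)) (nipfile : List (String × List (String × String))) (dev : Bool) : Prop :=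
  (nipfile.map Prod.fst).Nodup
instance (dep : List (String × String)) (nipfile : List (String × List (String × String))) (dev : Bool) : Decidable (Pre_add_dep_to_nipfile_context dep nipfile dev) := by unfold Pre_add_dep_to_nipfile_context; infer_instance

def pvWitness_add_dep_to_nipfile_context : (List (String × String)) × (List (String × List (String × String))) × Bool :=
  ([("a", "1")], [("dependencies", [("b", "2")])], false)

def Spec_add_dep_to_nipfile_context (dep : List (String × String)) (nipfile : List (String × List (String × String))) (dev : Bool) (out : List (String × List (String × String))) : Prop := out = add_dep_to_nipfile_context_alt dep nipfile dev
instance (dep : List (String × String)) (nipfile : List (String × List (String × String))) (dev : Bool) (out : List (String × List (String × String))) : Decidable (Spec_add_dep_to_nipfile_context dep nipfile dev out) := by unfold Spec_add_dep_to_nipfile_context; infer_instance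

-- ===== CLAIM (what is proved, stated in full; the proofs are below) =====
def Claim_equal_add_dep_to_nipfile_context : Prop := ∀ (dep : List (String × String)) (nipfile : List (String × List (String × String))) (dev : Bool), Dom_add_dep_to_nipfile_context dep nipfile dev → Pre_add_dep_to_nipfile_context dep nipfile dev → Spec_add_dep_to_nipfile_context dep nipfile dev (add_dep_to_nipfile_context dep nipfile dev)

-- ===== LEMMAS AND PROOFS =====

theorem pvGetA_none_of_not_mem {α : Type} (l : List (String × α)) (k : String)
    (h : k ∉ l.map Prod.fst) : pvGetA l k = none := by
  induction l with
  | nil => rfl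
  | cons p rest ih =>
    simp only [List.map_cons, List.mem_cons] at h
    push_neg at h
    have hne : (p.1 == k) = false := by
      simp [beq_iff_eq]; exact fun he => h.1 he.symm
    obtain ⟨k', v'⟩ := p
    simp only [pvGetA]
    simp only at hne
    rw [if_neg (by simp_all)]
    exact ih h.2

theorem map_no_key {α : Type} (l : List (String × α)) (k : String) (g : α → α)
    (h : pvGetA l k = none) :
    l.map (fun p => if p.1 == k then (p.1, g p.2) else p) = l := by
  induction l with
  | nil => rfl
  | cons p rest ih =>
    obtain ⟨k', v'⟩ := p
    simp only [pvGetA] at h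
    by_cases hk : k' == k
    · simp [hk] at h
    · simp only [hk, if_neg] at h ⊢
      simp only [List.map_cons]
      rw [if_neg (by simpa using hk)]
      rw [ih (by simpa [hk] using h)]

theorem pvSetA_absent {α : Type} (l : List (String × α)) (k : String) (v : α)
    (h : pvGetA l k = none) : pvSetA l k v = l ++ [(k, v)] := by
  induction l with
  | nil => rfl
  | cons p rest ih =>
    obtain ⟨k', v'⟩ := p
    simp only [pvGetA] at h
    by_cases hk : k' == k
    · simp [hk] at h
    · simp only [pvSetA, hk]
      simp [ih (by simpa [hk] using h)]

theorem pvGetA_map_some {α : Type} (l : List (String × α)) (k : String) (g : α → α) (d : α)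
    (h : pvGetA l k = some d) :
    pvGetA (l.map (fun p => if p.1 == k then (p.1, g p.2) else p)) k = some (g d) := by
  induction l with
  | nil => simp [pvGetA] at h
  | cons p rest ih =>
    obtain ⟨k', v'⟩ := p
    simp only [pvGetA] at h
    by_cases hk : k' == k
    · have hkeq : k' = k := by simpa using hk
      subst hkeq
      simp only [hk, if_pos] at h
      cases h
      simp [pvGetA]
    · simp only [hk] at h
      simp only [List.map_cons]
      rw [if_neg (by simpa using hk)]
      simp only [pvGetA]
      rw [if_neg (by simpa using hk)]
      exact ih (by simpa [hk] using h)

theorem pvSetA_eq_map {α : Type} (l : List (String × α)) (k : String) (g : α → α) (d : α)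
    (hnd : (l.map Prod.fst).Nodup) (h : pvGetA l k = some d) :
    pvSetA l k (g d) = l.map (fun p => if p.1 == k then (p.1, g p.2) else p) := by
  induction l with
  | nil => simp [pvGetA] at h
  | cons p rest ih =>
    obtain ⟨k', v'⟩ := p
    simp only [List.map_cons, List.nodup_cons] at hnd
    simp only [pvGetA] at h
    by_cases hk : k' == k
    · have hkeq : k' = k := by simpa [beq_iff_eq] using hk
      simp only [hk, if_pos] at h
      cases h
      simp only [pvSetA, hk, if_pos, List.map_cons, if_pos hk]
      have hrest : pvGetA rest k = none :=
        pvGetA_none_of_not_mem rest k (hkeq ▸ hnd.1)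
      rw [map_no_key rest k g hrest, hkeq]
    · simp only [hk, if_neg] at h
      simp only [pvSetA, List.map_cons]
      rw [if_neg (by simpa using hk), if_neg (by simpa using hk)]
      rw [ih hnd.2 (by simpa [hk] using h)]

theorem pvSetA_append_key {α : Type} (l : List (String × α)) (k : String) (w v : α)
    (h : pvGetA l k = none) : pvSetA (l ++ [(k, w)]) k v = l ++ [(k, v)] := by
  induction l with
  | nil => simp [pvSetA]
  | cons p rest ih =>
    obtain ⟨k', v'⟩ := p
    simp only [pvGetA] at h
    by_cases hk : k' == k
    · simp [hk] at h
    · simp only [List.cons_append, pvSetA, hk]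
      simp [ih (by simpa [hk] using h)]

-- ===== VERDICT (by name: the statement is the Claim_ definition above) =====
theorem add_dep_to_nipfile_context_spec : Claim_equal_add_dep_to_nipfile_context := by
  intro dep nipfile dev _ hpre
  unfold Pre_add_dep_to_nipfile_context at hpre
  unfold Spec_add_dep_to_nipfile_context add_dep_to_nipfile_context_alt
  rw [add_dep_to_nipfile_context.eq_def]
  set key := (if dev then "dev_dependencies" else "dependencies") with hkey
  split
  · next d heq =>
    rw [pvSetA_eq_map nipfile key (fun v => pvUpdateA v dep) d hpre heq]
    rw [if_pos (by rw [pvGetA_map_some nipfile key (fun v => pvUpdateA v dep) d heq]; simp)]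
  · next heq =>
    rw [add_dep_to_nipfile_context.eq_def]
    rw [← hkey]
    rw [pvSetA_absent nipfile key [] heq]
    have hget : pvGetA (nipfile ++ [(key, [])]) key = some [] := by
      rw [← pvSetA_absent nipfile key [] heq]; exact pvGetA_setA_self _ _ _
    split
    · next d2 heq2 =>
      rw [hget] at heq2; cases heq2
      rw [pvSetA_append_key nipfile key [] (pvUpdateA [] dep) heq]
      simp only [map_no_key nipfile key (fun v => pvUpdateA v dep) heq, heq,
        Option.isSome_none, Bool.false_eq_true, if_false]
    · next heq2 => rw [hget] at heq2; exact absurd heq2 (by simp)
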